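-- pv_equiv track=rewrite | github.com/jeff87654/Lifting | build_s16_master.py | format_group
-- ===== SOURCE A (Python) =====
-- def format_gen(img_list):
--     """Format a single generator as GAP list string."""
--     return "[ " + ", ".join(str(x) for x in img_list) + " ]"
--
-- def format_group(gens):
--     """Format a group (list of generators) as GAP list-of-lists string."""
--     gen_strs = [format_gen(g) for g in gens]
--     if len(gen_strs) == 1:
--         return "  [ " + gen_strs[0] + " ]"
--     # Multi-gen: first on same line as [, rest indented
--     lines = ["  [ " + gen_strs[0] + ", "]
--     for i, gs in enumerate(gen_strs[1:], 1):
--         if i < len(gen_strs) - 1: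
--             lines.append("  " + gs + ", ")
--         else:
--             lines.append("  " + gs + " ]")
--     return "\n".join(lines)
-- ===== SOURCE B (Python) =====
-- def format_gen(img_list):
--     return "[ " + ", ".join(str(x) for x in img_list) + " ]"
--
-- def format_group(gens):
--     gen_strs = [format_gen(g) for g in gens]
--     body = gen_strs[0]
--     for gs in gen_strs[1:]:
--         body += ", \n  " + gs
--     return "  [ " + body + " ]"
-- ===== Notes on version B (the rewrite author's own statement) =====
-- stated objective: simpler
-- what changed: B drops A's special-case branch for a single generator and the last-element index test inside the loop, instead folding the tail onto the head string with a fixed separator ", \n " and wrapping once with " [ " / " ]".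
import Mathlib
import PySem

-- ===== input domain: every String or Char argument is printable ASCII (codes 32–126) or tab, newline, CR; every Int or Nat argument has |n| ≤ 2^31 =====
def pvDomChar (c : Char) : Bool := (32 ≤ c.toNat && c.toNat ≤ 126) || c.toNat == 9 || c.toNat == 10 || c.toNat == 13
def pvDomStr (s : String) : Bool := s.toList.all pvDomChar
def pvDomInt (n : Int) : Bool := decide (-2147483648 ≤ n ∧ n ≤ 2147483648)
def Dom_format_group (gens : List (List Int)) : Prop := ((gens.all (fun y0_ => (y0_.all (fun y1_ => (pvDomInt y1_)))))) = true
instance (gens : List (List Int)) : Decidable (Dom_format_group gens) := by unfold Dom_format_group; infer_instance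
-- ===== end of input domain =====

-- B replaces A's single-generator branch and last-element index test by one head-plus-fold
-- accumulation of the body string (objective: simpler). Return value only; no mutation.

-- ===== PORT A =====
def format_gen (img_list : List Int) : String :=
  "[ " ++ PySem.Str.join ", " (img_list.map PySem.Int.toStr) ++ " ]"

-- A's for-loop over enumerate(gen_strs[1:], 1): i is the running index, n = len(gen_strs)
def pvLinesA (rest : List String) (i n : Nat) : List String :=
  match rest with
  | [] => []
  | gs :: t =>
      (if i < n - 1 then "  " ++ gs ++ ", " else "  " ++ gs ++ " ]") :: pvLinesA t (i + 1) n

def format_group (gens : List (List Int)) : String :=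
  let gen_strs := gens.map format_gen
  if gen_strs.length == 1 then
    "  [ " ++ gen_strs.headD "" ++ " ]"
  else
    match gen_strs with
    | [] => ""  -- Python raises IndexError on gen_strs[0] here; excluded by Pre_
    | g0 :: rest =>
        PySem.Str.join "\n" (("  [ " ++ g0 ++ ", ") :: pvLinesA rest 1 (g0 :: rest).length)

-- ===== PORT B =====
def format_group_alt (gens : List (List Int)) : String :=
  match gens.map format_gen with
  | [] => ""  -- Python raises IndexError on gen_strs[0] here; excluded by Pre_
  | g0 :: rest =>
      "  [ " ++ rest.foldl (fun body gs => body ++ ", \n  " ++ gs) g0 ++ " ]"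

-- ===== PRECONDITION & SPEC =====
-- Pre_ excludes only the empty list, on which Python A (and B) raise IndexError.
def Pre_format_group (gens : List (List Int)) : Prop := gens ≠ []
instance (gens : List (List Int)) : Decidable (Pre_format_group gens) := by
  unfold Pre_format_group; infer_instance

def pvWitness_format_group : List (List Int) := [[1, 2], [3]]

def Spec_format_group (gens : List (List Int)) (out : String) : Prop := out = format_group_alt gens
instance (gens : List (List Int)) (out : String) : Decidable (Spec_format_group gens out) := by unfold Spec_format_group; infer_instance

-- ===== CLAIM (what is proved, stated in full; the proofs are below) =====
def Claim_equal_format_group : Prop := ∀ (gens : List (List Int)), Dom_format_group gens → Pre_format_group gens → Spec_format_group gens (format_group gens)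

-- ===== LEMMAS AND PROOFS =====

-- "\n".join on a list of at least two strings, one step
lemma pvJoin_cons_cons (s a b : String) (t : List String) :
    PySem.Str.join s (a :: b :: t) = a ++ s ++ PySem.Str.join s (b :: t) := by
  apply String.ext
  simp [PySem.Str.join, PySem.Chars.join, List.intercalate]

lemma pvJoin_single (s a : String) : PySem.Str.join s [a] = a := by
  apply String.ext
  simp [PySem.Str.join, PySem.Chars.join, List.intercalate]

-- B's fold only appends on the right, so a prefix of the accumulator passes through
lemma pvFoldPrefix (t : List String) (p q : String) :
    t.foldl (fun body gs => body ++ ", \n  " ++ gs) (p ++ q)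
      = p ++ t.foldl (fun body gs => body ++ ", \n  " ++ gs) q := by
  induction t generalizing q with
  | nil => rfl
  | cons x t ih =>
      have h : (p ++ q) ++ ", \n  " ++ x = p ++ (q ++ ", \n  " ++ x) := by
        apply String.ext; simp
      simp only [List.foldl_cons, h, ih]

-- A's joined tail lines equal B's fold, for any start accumulator, under the loop invariant i + |rest| = n
lemma pvKey (t : List String) : ∀ (x acc : String) (i n : Nat), i + (x :: t).length = n →
    PySem.Str.join "\n" ((acc ++ ", ") :: pvLinesA (x :: t) i n)
      = (x :: t).foldl (fun body gs => body ++ ", \n  " ++ gs) acc ++ " ]" := by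
  induction t with
  | nil =>
      intro x acc i n hn
      have hif : ¬ (i < n - 1) := by simp at hn; omega
      rw [pvLinesA, if_neg hif, pvLinesA, pvJoin_cons_cons, pvJoin_single]
      apply String.ext; simp
  | cons y t ih =>
      intro x acc i n hn
      have hif : i < n - 1 := by simp at hn; omega
      have hn' : (i + 1) + (y :: t).length = n := by simp at hn ⊢; omega
      rw [pvLinesA, if_pos hif, pvJoin_cons_cons, ih y ("  " ++ x) (i + 1) n hn']
      rw [show List.foldl (fun body gs => body ++ ", \n  " ++ gs) acc (x :: y :: t)
            = List.foldl (fun body gs => body ++ ", \n  " ++ gs) (acc ++ ", \n  " ++ x) (y :: t) from rfl]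
      rw [show acc ++ ", \n  " ++ x = (acc ++ ", \n") ++ ("  " ++ x) from by apply String.ext; simp]
      rw [pvFoldPrefix (y :: t) (acc ++ ", \n") ("  " ++ x)]
      generalize List.foldl (fun body gs => body ++ ", \n  " ++ gs) ("  " ++ x) (y :: t) = F
      apply String.ext; simp

-- ===== VERDICT (by name: the statement is the Claim_ definition above) =====
theorem format_group_spec : Claim_equal_format_group := by
  intro gens _ hpre
  unfold Spec_format_group format_group format_group_alt
  match gens with
  | [] => exact absurd rfl hpre
  | [g] => simp
  | g :: y :: t =>
      simp only [List.map_cons, List.length_cons]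
      have hne : ((t.map format_gen).length + 1 + 1 == 1) = false := by
        simp
      rw [hne]
      simp only [Bool.false_eq_true, if_false]
      rw [show "  [ " ++ format_gen g ++ ", " = ("  [ " ++ format_gen g) ++ ", " from rfl]
      rw [pvKey (t.map format_gen) (format_gen y) ("  [ " ++ format_gen g) 1
            ((List.map format_gen t).length + 1 + 1)
            (by simp only [List.length_cons, List.length_map]; omega)]
      rw [pvFoldPrefix]
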